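-- pv_equiv track=rewrite | github.com/Houndof/the-dive | minimax_lab_minimax.py | evaluar
-- ===== SOURCE A (Python) =====
-- def prota_posicion(laberinto): #funcion para encontrar la posicion incial de los pj
--   posi_tom = None #para poder reubicar ambos personajes
--   posi_jerry = None
--
--   for i, fila in enumerate(laberinto): #para poder identificar en que fila estan
--     for j, colummna in enumerate(fila): #para poder identificar en que columna estan
--       if colummna == "T":
--         posi_tom = (i, j)#ubica la posicion de T
--       elif colummna == "J":
--         posi_jerry = (i, j)#ubica la posicion de j, i
--   return posi_tom, posi_jerry #devuelve ambas posicionesd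
--
-- def dista_manhatan (pos1, pos2):
--   return abs(pos1[0]- pos2[0])+ abs(pos1[1]- pos2[1])
--
-- def evaluar(estado):
--   posi_tom, posi_jerry = prota_posicion(estado) #analizar esta parte
--   posi_salida = None
--
--   for f in range(len(estado)):
--     for c in range(len(estado[0])):
--       if estado[f][c] == "S":
--         posi_salida = (f , c)
--
--   if not posi_salida:
--     return 9999
--   #calculo de puntuacion
--   if posi_jerry == posi_salida:
--     return 10000 #jerry gana
--   if posi_jerry == posi_tom:
--     return -10000 # atraparon a jerry
--   #calculo de distancia
--   dist_jerry_salida = dista_manhatan(posi_jerry, posi_salida)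
--   dist_tom_jerry = dista_manhatan(posi_tom, posi_jerry)
--   puntaje =  dist_tom_jerry - dist_jerry_salida
--   return puntaje
-- ===== SOURCE B (Python) =====
-- def evaluar(estado):
--     # Flatten the grid once; find each marker's LAST occurrence by searching the
--     # reversed flat list (first hit there = last in row-major order) and recover
--     # the (row, col) coordinates with divmod by the grid width.
--     flat = [celda for fila in estado for celda in fila]
--     ancho = len(estado[0]) if estado else 0
--
--     def ultima(marca):
--         try:
--             k = flat[::-1].index(marca)
--         except ValueError:
--             return None
--         return divmod(len(flat) - 1 - k, ancho)
--
--     salida = ultima("S")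
--     if salida is None:
--         return 9999
--     jerry = ultima("J")
--     tom = ultima("T")
--     if jerry == salida:
--         return 10000
--     if jerry == tom:
--         return -10000
--     return (abs(tom[0] - jerry[0]) + abs(tom[1] - jerry[1])) - \
--            (abs(jerry[0] - salida[0]) + abs(jerry[1] - salida[1]))
-- ===== Notes on version B (the rewrite author's own statement) =====
-- stated objective: alternative
-- what changed: Replaces A's two accumulator scans over the 2-D grid (enumerate pass for T/J plus an index-based range pass for S) by flattening the grid once and, per marker, taking the first hit in the reversed flat list (list.index on flat[::-1]) and recovering (row,col) by divmod with the width.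
-- outside the precondition, e.g. on evaluar([['J', 'T'], ['.', '.', 'S']]): A returns 9999, B returns -1
import Mathlib
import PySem

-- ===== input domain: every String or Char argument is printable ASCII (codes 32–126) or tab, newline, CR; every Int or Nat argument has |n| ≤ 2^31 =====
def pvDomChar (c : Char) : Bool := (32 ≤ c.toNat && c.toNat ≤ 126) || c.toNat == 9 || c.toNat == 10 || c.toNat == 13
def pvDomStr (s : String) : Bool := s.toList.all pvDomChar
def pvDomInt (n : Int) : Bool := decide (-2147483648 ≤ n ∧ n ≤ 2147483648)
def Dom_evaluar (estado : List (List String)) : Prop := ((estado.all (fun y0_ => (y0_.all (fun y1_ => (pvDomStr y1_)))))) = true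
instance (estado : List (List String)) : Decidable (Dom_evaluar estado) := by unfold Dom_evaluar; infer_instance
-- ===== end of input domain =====

-- B flattens the grid once and finds each marker's last occurrence via index() on the reversed flat list plus divmod by the width, instead of A's two nested accumulator scans; same scoring (objective: alternative decomposition).
-- Pre_ restricts to rectangular grids and excludes the T/J-mismatch grids on which the Pythons raise TypeError.


-- ===== PORT A =====
def protaPosicion (laberinto : List (List String)) :
    Option (Int × Int) × Option (Int × Int) :=
  (PySem.List.enumerate laberinto 0).foldl (fun st p =>
    (PySem.List.enumerate p.2 0).foldl (fun st2 q =>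
      if q.2 = "T" then (some (p.1, q.1), st2.2)
      else if q.2 = "J" then (st2.1, some (p.1, q.1))
      else st2) st) (none, none)

def distaManhatan (pos1 pos2 : Int × Int) : Int :=
  |pos1.1 - pos2.1| + |pos1.2 - pos2.2|

-- A's S-loop: for f in range(len(estado)): for c in range(len(estado[0])): if estado[f][c] == "S"
-- (pyGetD with a default is used where Python indexes; inside Pre_ every index is in range)
def buscaSalida (estado : List (List String)) : Option (Int × Int) :=
  (PySem.List.pyRange 0 (estado.length : Int) 1).foldl (fun acc f =>
    (PySem.List.pyRange 0 ((estado.headD []).length : Int) 1).foldl (fun acc2 c =>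
      if PySem.List.pyGetD (PySem.List.pyGetD estado f []) c "" = "S" then some (f, c)
      else acc2) acc) none

def evaluar (estado : List (List String)) : Int :=
  let pt := (protaPosicion estado).1
  let pj := (protaPosicion estado).2
  match buscaSalida estado with
  | none => 9999
  | some ps =>
    if pj = some ps then 10000
    else if pj = pt then -10000
    else match pj, pt with
      | some j, some t => distaManhatan t j - distaManhatan j ps
      | _, _ => 0  -- Python raises TypeError here; excluded by Pre_

-- ===== PORT B =====
-- flat[::-1].index(marca) then divmod(len(flat)-1-k, ancho); [::-1] is reverse
-- (PySem.List.slice?_none_none_neg_one); ValueError → none. divmod's ZeroDivisionError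
-- (ancho = 0) is unreachable when a marker was found on a rectangular grid.
def ultima (flat : List String) (ancho : Int) (marca : String) : Option (Int × Int) :=
  (PySem.List.index? flat.reverse marca).elim none (fun k =>
    let idx : Int := (flat.length : Int) - 1 - (k : Int)
    some (PySem.Int.floordiv idx ancho, PySem.Int.mod idx ancho))

def evaluar_alt (estado : List (List String)) : Int :=
  let flat := estado.flatMap (fun fila => fila)
  let ancho : Int := if estado = [] then 0 else ((estado.headD []).length : Int)
  (ultima flat ancho "S").elim 9999 (fun salida =>
    let jerry := ultima flat ancho "J"
    let tom := ultima flat ancho "T"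
    if jerry = some salida then 10000
    else if jerry = tom then -10000
    else tom.elim 0 (fun t => jerry.elim 0 (fun j =>
      -- the 'elim 0' defaults are Python's TypeError; excluded by Pre_
      (|t.1 - j.1| + |t.2 - j.2|) - (|j.1 - salida.1| + |j.2 - salida.2|))))

-- ===== PRECONDITION & SPEC =====
-- Pre_ excludes (a) non-rectangular grids (short rows make A's S-scan raise IndexError;
-- rows longer than row 0 are scanned only up to len(estado[0]) by A, so it can miss an 'S'
-- that B's whole-grid flattening sees — see cites), EXCEPT the harmless jagged grids with
-- no short row and no 'S' at all, which stay inside (both return 9999); and (b) grids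
-- containing 'S' where exactly one of 'T','J' occurs, on which both Pythons raise TypeError.
def Pre_evaluar (estado : List (List String)) : Prop :=
  ((∀ row ∈ estado, row.length = (estado.headD []).length) ∧
   ((∃ row ∈ estado, "S" ∈ row) →
     ((∃ row ∈ estado, "T" ∈ row) ∧ (∃ row ∈ estado, "J" ∈ row)) ∨
     (¬(∃ row ∈ estado, "T" ∈ row) ∧ ¬(∃ row ∈ estado, "J" ∈ row)))) ∨
  ((∀ row ∈ estado, (estado.headD []).length ≤ row.length) ∧
   ¬(∃ row ∈ estado, "S" ∈ row))
instance (estado : List (List String)) : Decidable (Pre_evaluar estado) := by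
  unfold Pre_evaluar; infer_instance

def pvWitness_evaluar : List (List String) := [["T", "J"], ["S", "."]]

def Spec_evaluar (estado : List (List String)) (out : Int) : Prop := out = evaluar_alt estado
instance (estado : List (List String)) (out : Int) : Decidable (Spec_evaluar estado out) := by
  unfold Spec_evaluar; infer_instance

-- ===== CLAIM (what is proved, stated in full; the proofs are below) =====
def Claim_equal_evaluar : Prop := ∀ (estado : List (List String)), Dom_evaluar estado → Pre_evaluar estado → Spec_evaluar estado (evaluar estado)

-- ===== LEMMAS AND PROOFS =====

-- index of the LAST occurrence of v in l (proof-side reference function)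
def lastIdx? (l : List String) (v : String) : Option Nat :=
  match l with
  | [] => none
  | x :: xs =>
    match lastIdx? xs v with
    | some i => some (i + 1)
    | none => if x = v then some 0 else none

-- (row, col) of the LAST row-major occurrence of v (proof-side reference function)
def gridLast (rows : List (List String)) (v : String) : Option (Nat × Nat) :=
  match rows with
  | [] => none
  | r :: rs =>
    match gridLast rs v with
    | some p => some (p.1 + 1, p.2)
    | none => (lastIdx? r v).map (fun j => (0, j))

-- A-side single-marker double scan (protaPosicion's components / buscaSalida's shape)
def markFold (grid : List (List String)) (v : String) : Option (Int × Int) :=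
  (PySem.List.enumerate grid 0).foldl (fun acc p =>
    (PySem.List.enumerate p.2 0).foldl (fun a2 q =>
      if q.2 = v then some (p.1, q.1) else a2) acc) none

lemma lastIdx?_lt {l : List String} {v : String} {i : Nat}
    (h : lastIdx? l v = some i) : i < l.length := by
  induction l generalizing i with
  | nil => simp [lastIdx?] at h
  | cons x xs ih =>
    unfold lastIdx? at h
    simp only [List.length_cons]
    cases hx : lastIdx? xs v with
    | some i' =>
      rw [hx] at h
      have := ih hx
      simp only [Option.some.injEq] at h
      omega
    | none =>
      rw [hx] at h
      by_cases hxv : x = v <;> simp [hxv] at h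
      omega

lemma lastIdx?_none_iff (l : List String) (v : String) :
    lastIdx? l v = none ↔ v ∉ l := by
  induction l with
  | nil => simp [lastIdx?]
  | cons x xs ih =>
    simp only [lastIdx?]
    cases hx : lastIdx? xs v with
    | some i =>
      have hv : v ∈ xs := by
        by_contra hc
        rw [← ih] at hc
        simp [hc] at hx
      simp [hv]
    | none =>
      have hv : v ∉ xs := ih.1 hx
      by_cases hxv : x = v
      · subst hxv; simp
      · simp [hxv, hv, Ne.symm hxv]

lemma lastIdx?_cons (x : String) (xs : List String) (v : String) :
    lastIdx? (x :: xs) v =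
      match lastIdx? xs v with
      | some i => some (i + 1)
      | none => if x = v then some 0 else none := rfl

lemma gridLast_cons (r : List String) (rs : List (List String)) (v : String) :
    gridLast (r :: rs) v =
      match gridLast rs v with
      | some p => some (p.1 + 1, p.2)
      | none => (lastIdx? r v).map (fun j => (0, j)) := rfl

lemma lastIdx?_append (a b : List String) (v : String) :
    lastIdx? (a ++ b) v =
      match lastIdx? b v with
      | some i => some (a.length + i)
      | none => lastIdx? a v := by
  induction a with
  | nil =>
    simp only [List.nil_append]
    cases hb : lastIdx? b v <;> simp [lastIdx?]
  | cons x xs ih =>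
    rw [List.cons_append, lastIdx?_cons, ih, lastIdx?_cons]
    cases hb : lastIdx? b v with
    | some i => simp; omega
    | none => rfl

-- reversed-list index? computes the last index
lemma index?_reverse_eq (l : List String) (v : String) :
    PySem.List.index? l.reverse v =
      match lastIdx? l v with
      | some i => some (l.length - 1 - i)
      | none => none := by
  induction l with
  | nil => simp [lastIdx?, PySem.List.index?_eq_idxOf?]
  | cons x xs ih =>
    rw [List.reverse_cons, lastIdx?_cons]
    cases hx : lastIdx? xs v with
    | some i =>
      have hmem : v ∈ xs := by
        by_contra hv
        rw [← lastIdx?_none_iff xs v] at hv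
        simp [hv] at hx
      have hlt : i < xs.length := lastIdx?_lt hx
      rw [PySem.List.index?_append_of_mem _ (by simpa using hmem), ih, hx]
      simp
      omega
    | none =>
      have hv : v ∉ xs := (lastIdx?_none_iff xs v).1 hx
      by_cases hxv : x = v
      · subst hxv
        have hv' : x ∉ xs.reverse := by simpa using hv
        rw [PySem.List.index?_append_singleton_self xs.reverse x hv']
        simp
      · have hne : v ∉ xs.reverse ++ [x] := by
          simp [hv]
          exact fun h => hxv h.symm
        rw [(PySem.List.index?_eq_none_iff _ _).2 hne]
        simp [hxv]

lemma inner_mark (v : String) (i : Int) (row : List String) :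
    ∀ (c : Int) (acc : Option (Int × Int)),
    (PySem.List.enumerate row c).foldl (fun a2 q =>
        if q.2 = v then some (i, q.1) else a2) acc =
      match lastIdx? row v with
      | some j => some (i, c + (j : Int))
      | none => acc := by
  induction row with
  | nil => intro c acc; simp [PySem.List.enumerate, lastIdx?]
  | cons x xs ih =>
    intro c acc
    rw [PySem.List.enumerate_cons, List.foldl_cons, ih, lastIdx?_cons]
    cases hx : lastIdx? xs v with
    | some j => simp; omega
    | none => by_cases hxv : x = v <;> simp [hxv]

lemma outer_mark (v : String) (rows : List (List String)) :
    ∀ (s : Int) (acc : Option (Int × Int)),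
    (PySem.List.enumerate rows s).foldl (fun a p =>
        (PySem.List.enumerate p.2 0).foldl (fun a2 q =>
          if q.2 = v then some (p.1, q.1) else a2) a) acc =
      match gridLast rows v with
      | some p => some (s + (p.1 : Int), (p.2 : Int))
      | none => acc := by
  induction rows with
  | nil => intro s acc; simp [PySem.List.enumerate, gridLast]
  | cons r rs ih =>
    intro s acc
    rw [PySem.List.enumerate_cons, List.foldl_cons, ih, inner_mark, gridLast_cons]
    cases hr : gridLast rs v with
    | some p => simp; omega
    | none =>
      cases hl : lastIdx? r v with
      | some j => simp
      | none => simp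

lemma markFold_eq_gridLast (grid : List (List String)) (v : String) :
    markFold grid v =
      match gridLast grid v with
      | some p => some ((p.1 : Int), (p.2 : Int))
      | none => none := by
  unfold markFold
  rw [outer_mark]
  cases gridLast grid v with
  | some p => simp
  | none => rfl

lemma gridLast_bound {rows : List (List String)} {v : String} {p : Nat × Nat}
    (h : gridLast rows v = some p) : ∃ r ∈ rows, lastIdx? r v = some p.2 := by
  induction rows generalizing p with
  | nil => simp [gridLast] at h
  | cons r rs ih =>
    rw [gridLast_cons] at h
    cases hr : gridLast rs v with
    | some q =>
      rw [hr] at h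
      simp only [Option.some.injEq] at h
      subst h
      obtain ⟨r', hr', hq⟩ := ih hr
      exact ⟨r', by simp [hr'], hq⟩
    | none =>
      rw [hr] at h
      cases hl : lastIdx? r v with
      | some j =>
        rw [hl] at h
        simp only [Option.map_some, Option.some.injEq] at h
        subst h
        exact ⟨r, by simp, hl⟩
      | none => rw [hl] at h; simp at h

lemma flat_lastIdx (rows : List (List String)) (v : String) (w : Nat)
    (hrect : ∀ r ∈ rows, r.length = w) :
    lastIdx? (rows.flatMap (fun f => f)) v =
      match gridLast rows v with
      | some p => some (p.1 * w + p.2)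
      | none => none := by
  induction rows with
  | nil => simp [gridLast, lastIdx?]
  | cons r rs ih =>
    have hw : r.length = w := hrect r (by simp)
    have hrest : ∀ r' ∈ rs, r'.length = w := fun r' h => hrect r' (by simp [h])
    rw [List.flatMap_cons, lastIdx?_append, ih hrest, gridLast_cons]
    cases hr : gridLast rs v with
    | some p => simp [hw]; ring
    | none => cases hl : lastIdx? r v <;> simp

-- the central lemma: A-shaped double scan = B's reversed-flat-index + divmod
lemma markFold_eq_ultima (estado : List (List String)) (v : String)
    (hrect : ∀ row ∈ estado, row.length = (estado.headD []).length) :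
    markFold estado v =
      ultima (estado.flatMap (fun fila => fila))
        (if estado = [] then 0 else ((estado.headD []).length : Int)) v := by
  set w : Nat := (estado.headD []).length with hwdef
  have hflat := flat_lastIdx estado v w hrect
  rw [markFold_eq_gridLast]
  unfold ultima
  rw [index?_reverse_eq, hflat]
  cases hg : gridLast estado v with
  | none => rfl
  | some p =>
    obtain ⟨r, hr, hlast⟩ := gridLast_bound hg
    have hjw : p.2 < w := by rw [← hrect r hr]; exact lastIdx?_lt hlast
    have hwpos : 0 < w := Nat.lt_of_le_of_lt (Nat.zero_le _) hjw
    have hne : estado ≠ [] := by rintro rfl; simp at hr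
    have hm : p.1 * w + p.2 < (estado.flatMap (fun fila => fila)).length := by
      have := lastIdx?_lt (l := estado.flatMap (fun fila => fila)) (v := v) (by rw [hflat, hg])
      exact this
    rw [if_neg hne]
    have hidx : ((estado.flatMap (fun fila => fila)).length : Int) - 1 -
        (((estado.flatMap (fun fila => fila)).length - 1 - (p.1 * w + p.2) : Nat) : Int) =
        ((p.1 * w + p.2 : Nat) : Int) := by push_cast; omega
    simp only [Option.elim_some, hidx]
    have hfd : PySem.Int.floordiv ((p.1 * w + p.2 : Nat) : Int) (w : Int) = (p.1 : Int) := by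
      rw [PySem.Int.floordiv_eq_iff_of_pos (by exact_mod_cast hwpos)]
      push_cast; constructor <;> nlinarith [hjw]
    have hmd : PySem.Int.mod ((p.1 * w + p.2 : Nat) : Int) (w : Int) = (p.2 : Int) := by
      have := PySem.Int.floordiv_mul_add_mod ((p.1 * w + p.2 : Nat) : Int) (w : Int)
      rw [hfd] at this
      push_cast at this ⊢; linarith
    rw [hfd, hmd]

-- a (possibly out-of-range) Python index into a list yields an element or the default
lemma pyGetD_mem_or_default {α : Type} (xs : List α) (i : Int) (d : α) :
    PySem.List.pyGetD xs i d ∈ xs ∨ PySem.List.pyGetD xs i d = d := by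
  have hx : ∀ n : Nat, xs[n]?.getD d ∈ xs ∨ xs[n]?.getD d = d := by
    intro n
    cases hn : xs[n]? with
    | none => right; rfl
    | some x => left; simp only [Option.getD_some]; exact List.mem_of_getElem? hn
  simp only [PySem.List.pyGetD, PySem.List.pyGet?, PySem.List.pyIdx?]
  split_ifs <;> first | exact hx _ | (right; rfl)

lemma pyGetD_ne_S (xs : List String) (i : Int) (h : "S" ∉ xs) :
    PySem.List.pyGetD xs i "" ≠ "S" := by
  rcases pyGetD_mem_or_default xs i "" with hm | hd
  · exact fun hc => h (hc ▸ hm)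
  · rw [hd]; simp

lemma row_no_S (estado : List (List String)) (h : ∀ row ∈ estado, "S" ∉ row) (f : Int) :
    "S" ∉ PySem.List.pyGetD estado f [] := by
  rcases pyGetD_mem_or_default estado f ([] : List String) with hm | hd
  · exact h _ hm
  · rw [hd]; simp

lemma buscaSalida_noS (estado : List (List String))
    (h : ∀ row ∈ estado, "S" ∉ row) : buscaSalida estado = none := by
  unfold buscaSalida
  have hinner : ∀ (acc : Option (Int × Int)) (f : Int),
      f ∈ PySem.List.pyRange 0 (estado.length : Int) 1 →
      (PySem.List.pyRange 0 ((estado.headD []).length : Int) 1).foldl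
        (fun acc2 c =>
          if PySem.List.pyGetD (PySem.List.pyGetD estado f []) c "" = "S" then some (f, c)
          else acc2) acc = acc := by
    intro acc f _
    exact Eq.trans
      (PySem.List.foldl_congr_mem _ _ (fun acc2 _ => acc2) acc
        (fun acc2 c _ => if_neg (pyGetD_ne_S _ c (row_no_S estado h f))))
      (PySem.List.foldl_ignore _ _)
  exact Eq.trans
    (PySem.List.foldl_congr_mem _ _ (fun acc _ => acc) none hinner)
    (PySem.List.foldl_ignore _ _)

lemma ultima_none (flat : List String) (ancho : Int) (h : "S" ∉ flat) :
    ultima flat ancho "S" = none := by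
  unfold ultima
  rw [(PySem.List.index?_eq_none_iff _ _).2 (by simpa using h)]
  rfl

-- the shared scoring tail, A's match order vs B's match order
lemma score_eq (oT oJ oS : Option (Int × Int)) :
    (match oS with
     | none => (9999 : Int)
     | some ps =>
       if oJ = some ps then 10000
       else if oJ = oT then -10000
       else match oJ, oT with
         | some j, some t => distaManhatan t j - distaManhatan j ps
         | _, _ => 0) =
    (oS.elim (9999 : Int) (fun salida =>
       if oJ = some salida then 10000
       else if oJ = oT then -10000
       else oT.elim 0 (fun t => oJ.elim 0 (fun j =>
         (|t.1 - j.1| + |t.2 - j.2|) - (|j.1 - salida.1| + |j.2 - salida.2|))))) := by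
  cases oS with
  | none => rfl
  | some ps =>
    simp only [Option.elim_some]
    split_ifs <;> try rfl
    cases oT <;> cases oJ <;> simp [distaManhatan]

-- A's two-accumulator T/J scan splits into two single-marker scans
lemma inner_pair (i : Int) (row : List String) :
    ∀ (c : Int) (st : Option (Int × Int) × Option (Int × Int)),
    (PySem.List.enumerate row c).foldl (fun st2 q =>
        if q.2 = "T" then (some (i, q.1), st2.2)
        else if q.2 = "J" then (st2.1, some (i, q.1))
        else st2) st =
    ((PySem.List.enumerate row c).foldl (fun a2 q =>
        if q.2 = "T" then some (i, q.1) else a2) st.1,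
     (PySem.List.enumerate row c).foldl (fun a2 q =>
        if q.2 = "J" then some (i, q.1) else a2) st.2) := by
  induction row with
  | nil => intro c st; simp [PySem.List.enumerate]
  | cons x xs ih =>
    intro c st
    simp only [PySem.List.enumerate_cons, List.foldl_cons]
    by_cases hT : x = "T" <;> by_cases hJ : x = "J" <;> simp [hT, hJ, ih]

lemma outer_pair (rows : List (List String)) :
    ∀ (s : Int) (st : Option (Int × Int) × Option (Int × Int)),
    (PySem.List.enumerate rows s).foldl (fun st2 p =>
        (PySem.List.enumerate p.2 0).foldl (fun st3 q =>
          if q.2 = "T" then (some (p.1, q.1), st3.2)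
          else if q.2 = "J" then (st3.1, some (p.1, q.1))
          else st3) st2) st =
    ((PySem.List.enumerate rows s).foldl (fun a p =>
        (PySem.List.enumerate p.2 0).foldl (fun a2 q =>
          if q.2 = "T" then some (p.1, q.1) else a2) a) st.1,
     (PySem.List.enumerate rows s).foldl (fun a p =>
        (PySem.List.enumerate p.2 0).foldl (fun a2 q =>
          if q.2 = "J" then some (p.1, q.1) else a2) a) st.2) := by
  induction rows with
  | nil => intro s st; simp [PySem.List.enumerate]
  | cons r rs ih =>
    intro s st
    simp only [PySem.List.enumerate_cons, List.foldl_cons]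
    rw [inner_pair, ih]

lemma prota_split (estado : List (List String)) :
    protaPosicion estado = (markFold estado "T", markFold estado "J") := by
  unfold protaPosicion markFold
  rw [outer_pair]

-- A's index-based S-scan on a rectangular grid is the S markFold
lemma buscaSalida_eq (estado : List (List String))
    (hrect : ∀ row ∈ estado, row.length = (estado.headD []).length) :
    buscaSalida estado = markFold estado "S" := by
  unfold markFold buscaSalida
  rw [PySem.List.enumerate_eq_map_pyRange estado ([] : List String), List.foldl_map]
  simp only [PySem.List.len_eq]
  apply PySem.List.foldl_congr_mem
  intro acc f hf
  rw [PySem.List.mem_pyRange_one] at hf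
  have hrow : PySem.List.pyGetD estado f [] = estado[f.toNat] :=
    PySem.List.pyGetD_eq_getElem estado [] hf.1 hf.2
  rw [hrow, PySem.List.enumerate_eq_map_pyRange estado[f.toNat] ("" : String),
    List.foldl_map]
  simp only [PySem.List.len_eq]
  have hlen : ((estado[f.toNat]).length : Int) = ((estado.headD []).length : Int) := by
    exact_mod_cast hrect estado[f.toNat] (estado.getElem_mem _)
  rw [hlen]

-- ===== VERDICT (by name: the statement is the Claim_ definition above) =====
theorem evaluar_spec : Claim_equal_evaluar := by
  intro estado _ hpre
  show evaluar estado = evaluar_alt estado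
  have hA : evaluar estado =
      (match buscaSalida estado with
       | none => (9999 : Int)
       | some ps =>
         if (protaPosicion estado).2 = some ps then 10000
         else if (protaPosicion estado).2 = (protaPosicion estado).1 then -10000
         else match (protaPosicion estado).2, (protaPosicion estado).1 with
           | some j, some t => distaManhatan t j - distaManhatan j ps
           | _, _ => 0) := rfl
  have hB : evaluar_alt estado =
      ((ultima (estado.flatMap (fun fila => fila))
          (if estado = [] then 0 else ((estado.headD []).length : Int)) "S").elim (9999 : Int)
        (fun salida =>
         if ultima (estado.flatMap (fun fila => fila))
              (if estado = [] then 0 else ((estado.headD []).length : Int)) "J" = some salida then 10000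
         else if ultima (estado.flatMap (fun fila => fila))
              (if estado = [] then 0 else ((estado.headD []).length : Int)) "J" =
            ultima (estado.flatMap (fun fila => fila))
              (if estado = [] then 0 else ((estado.headD []).length : Int)) "T" then -10000
         else (ultima (estado.flatMap (fun fila => fila))
              (if estado = [] then 0 else ((estado.headD []).length : Int)) "T").elim 0
            (fun t => (ultima (estado.flatMap (fun fila => fila))
              (if estado = [] then 0 else ((estado.headD []).length : Int)) "J").elim 0 (fun j =>
           (|t.1 - j.1| + |t.2 - j.2|) - (|j.1 - salida.1| + |j.2 - salida.2|))))) := rfl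
  rcases hpre with ⟨hrect, _⟩ | ⟨_, hnoS⟩
  · rw [hA, hB, prota_split estado, buscaSalida_eq estado hrect,
      markFold_eq_ultima estado "S" hrect, markFold_eq_ultima estado "T" hrect,
      markFold_eq_ultima estado "J" hrect]
    exact score_eq _ _ _
  · have hnorow : ∀ row ∈ estado, "S" ∉ row := fun row hr hs => hnoS ⟨row, hr, hs⟩
    have hBS : "S" ∉ estado.flatMap (fun fila => fila) := by
      rw [List.mem_flatMap]
      rintro ⟨row, hr, hs⟩
      exact hnorow row hr hs
    rw [hA, hB, buscaSalida_noS estado hnorow, ultima_none _ _ hBS]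
    rfl
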